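-- pv_equiv track=rewrite | github.com/jjosorioc/Project-0-LyM | main.py | filterByToken
-- ===== SOURCE A (Python) =====
-- def filterByToken(lista: list[str])->list[str]:
--     """List to filter the 'commandsInputFile' list by each token.
--
--     Args:
--         lista (list[str]): List by commands.
--
--     Returns:
--         list[str]: List by each token.
--     """
--
--     newList = []
--     newNewList = []
--
--     for command in lista:
--         command = command.replace('(',' ( ')
--         command = command.replace(')',' ) ')
--         command = command.replace('[',' [ ')
--         command = command.replace(']',' ] ')
--         splitDelCommand = command.split(' ') # Nueva lista separada por los espacios
--
--         for token in splitDelCommand: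
--             newList.append(token)
--
--     for i in newList:
--         if i!='':
--             newNewList.append(i)
--
--     return newNewList
-- ===== SOURCE B (Python) =====
-- def filterByToken(lista: list[str]) -> list[str]:
--     """Single-pass character scanner: emits brackets as their own tokens and
--     maximal runs of non-space, non-bracket characters, without the
--     replace/split/filter passes."""
--     tokens = []
--     for command in lista:
--         cur = ""
--         for ch in command:
--             if ch in "()[]":
--                 if cur:
--                     tokens.append(cur)
--                 tokens.append(ch)
--                 cur = ""
--             elif ch == " ":
--                 if cur:
--                     tokens.append(cur)
--                 cur = ""
--             else:
--                 cur += ch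
--         if cur:
--             tokens.append(cur)
--     return tokens
-- ===== Notes on version B (the rewrite author's own statement) =====
-- stated objective: simpler
-- what changed: Replaced the replace-chain + split(' ') + separate empty-filter pass with a single character scan that emits brackets as singleton tokens and maximal runs of non-space, non-bracket characters directly.
import Mathlib
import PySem

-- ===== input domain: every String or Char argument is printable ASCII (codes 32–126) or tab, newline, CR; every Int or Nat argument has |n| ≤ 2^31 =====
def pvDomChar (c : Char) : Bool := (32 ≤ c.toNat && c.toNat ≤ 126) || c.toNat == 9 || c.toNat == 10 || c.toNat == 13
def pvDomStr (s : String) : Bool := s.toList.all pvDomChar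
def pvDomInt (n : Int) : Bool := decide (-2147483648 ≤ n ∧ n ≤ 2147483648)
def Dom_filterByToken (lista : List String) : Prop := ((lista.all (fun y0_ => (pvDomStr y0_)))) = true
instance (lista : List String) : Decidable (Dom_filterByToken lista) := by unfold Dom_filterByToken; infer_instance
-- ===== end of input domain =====

-- B replaces A's replace-chain + split(' ') + empty-filter passes by one direct character scan (objective: simpler).

-- ===== PORT A =====
def filterByToken (lista : List String) : List String :=
  -- newList: for each command, replace brackets by space-padded brackets, split on ' ', append all tokens
  let newList : List String := lista.foldl (fun acc command =>
    let c1 := PySem.Str.replace command "(" " ( "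
    let c2 := PySem.Str.replace c1 ")" " ) "
    let c3 := PySem.Str.replace c2 "[" " [ "
    let c4 := PySem.Str.replace c3 "]" " ] "
    -- command.split(' '): sep ≠ "", the Chars.splitOn form of str.split
    let splitDelCommand : List String := (PySem.Chars.splitOn c4.toList " ".toList).map String.ofList
    splitDelCommand.foldl (fun a token => a ++ [token]) acc) []
  -- second loop: keep the non-empty tokens
  newList.foldl (fun acc i => if i ≠ "" then acc ++ [i] else acc) []

-- ===== PORT B =====
def pvIsBracket (ch : Char) : Bool := ch ∈ "()[]".toList   -- ch in "()[]"

-- one step of B's inner loop; state = (tokens so far, current run of ordinary chars)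
def pvScanStep (st : List String × List Char) (ch : Char) : List String × List Char :=
  if pvIsBracket ch then
    ((if st.2 ≠ [] then st.1 ++ [String.ofList st.2] else st.1) ++ [String.ofList [ch]], [])
  else if ch = ' ' then
    ((if st.2 ≠ [] then st.1 ++ [String.ofList st.2] else st.1), [])
  else
    (st.1, st.2 ++ [ch])

def filterByToken_alt (lista : List String) : List String :=
  lista.foldl (fun tokens command =>
    let p := command.toList.foldl pvScanStep (tokens, [])
    if p.2 ≠ [] then p.1 ++ [String.ofList p.2] else p.1) []

-- ===== PRECONDITION & SPEC =====
def Spec_filterByToken (lista : List String) (out : List String) : Prop := out = filterByToken_alt lista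
instance (lista : List String) (out : List String) : Decidable (Spec_filterByToken lista out) := by unfold Spec_filterByToken; infer_instance

-- ===== CLAIM (what is proved, stated in full; the proofs are below) =====
def Claim_equal_filterByToken : Prop := ∀ (lista : List String), Dom_filterByToken lista → Spec_filterByToken lista (filterByToken lista)

-- ===== LEMMAS AND PROOFS =====

-- the combined effect of A's four replaces on one character
def pvRep (c : Char) : List Char := if pvIsBracket c then [' ', c, ' '] else [c]

-- structural form of splitOn on the single-char separator ' '
def pvSplit : List Char → List (List Char)
  | [] => [[]]
  | c :: t => if c = ' ' then [] :: pvSplit t else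
      match pvSplit t with
      | [] => [[c]]
      | h :: r => (c :: h) :: r

lemma pvSplit_ne_nil (l : List Char) : pvSplit l ≠ [] := by
  cases l with
  | nil => simp [pvSplit]
  | cons c t =>
    simp only [pvSplit]
    split_ifs
    · simp
    · cases h : pvSplit t <;> simp

-- replace with a single-char `old` is a flatMap
lemma replace_go_single (o : Char) (new : List Char) :
    ∀ (fuel : Nat) (l acc : List Char), l.length ≤ fuel →
      PySem.Chars.replace.go [o] new fuel l acc
        = acc.reverse ++ l.flatMap (fun c => if c = o then new else [c]) := by
  intro fuel
  induction fuel with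
  | zero =>
    intro l acc h
    have : l = [] := by cases l <;> simp_all
    subst this
    simp [PySem.Chars.replace.go]
  | succ n ih =>
    intro l acc h
    cases l with
    | nil => simp [PySem.Chars.replace.go]
    | cons c t =>
      by_cases hc : c = o
      · subst hc
        have hp : List.isPrefixOf [c] (c :: t) = true := by simp [List.isPrefixOf]
        simp only [PySem.Chars.replace.go, hp, if_pos, List.length_cons, List.drop_succ_cons,
          List.length_nil, List.drop_zero]
        rw [ih t (new.reverse ++ acc) (by simp at h; omega)]
        simp [List.flatMap_cons]
      · have hp : List.isPrefixOf [o] (c :: t) = false := by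
          simp only [List.isPrefixOf, Bool.and_true, beq_eq_false_iff_ne, ne_eq]
          exact fun h' => hc h'.symm
        simp only [PySem.Chars.replace.go, hp]
        rw [ih t (c :: acc) (by simp at h; omega)]
        simp [List.flatMap_cons, hc]

lemma replace_single (s : List Char) (o : Char) (new : List Char) :
    PySem.Chars.replace s [o] new = s.flatMap (fun c => if c = o then new else [c]) := by
  simp only [PySem.Chars.replace, List.isEmpty_cons, if_neg, Bool.false_eq_true,
    not_false_eq_true]
  exact replace_go_single o new s.length s [] (le_refl _)

-- splitOn on the single-char separator ' ' is pvSplit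
lemma splitOn_go_space :
    ∀ (fuel : Nat) (l cur : List Char) (acc : List (List Char)), l.length < fuel →
      PySem.Chars.splitOn.go [' '] fuel l cur acc
        = acc.reverse ++ (match pvSplit l with
            | [] => []
            | h :: r => (cur.reverse ++ h) :: r) := by
  intro fuel
  induction fuel with
  | zero => intro l cur acc h; omega
  | succ n ih =>
    intro l cur acc h
    cases l with
    | nil => simp [PySem.Chars.splitOn.go, pvSplit]
    | cons c t =>
      by_cases hc : c = ' '
      · subst hc
        have hp : List.isPrefixOf [' '] (' ' :: t) = true := by simp [List.isPrefixOf]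
        simp only [PySem.Chars.splitOn.go, hp, if_pos, List.drop_succ_cons,
          List.length_nil, List.length_cons, List.drop_zero]
        rw [ih t [] (cur.reverse :: acc) (by simp at h; omega)]
        obtain ⟨h0, r0, hr⟩ : ∃ h0 r0, pvSplit t = h0 :: r0 := by
          cases hh : pvSplit t with
          | nil => exact absurd hh (pvSplit_ne_nil t)
          | cons a b => exact ⟨a, b, rfl⟩
        simp [pvSplit, hr]
      · have hp : List.isPrefixOf [' '] (c :: t) = false := by
          simp only [List.isPrefixOf, Bool.and_true, beq_eq_false_iff_ne, ne_eq]
          exact fun h' => hc h'.symm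
        simp only [PySem.Chars.splitOn.go, hp]
        rw [ih t (c :: cur) acc (by simp at h; omega)]
        obtain ⟨h0, r0, hr⟩ : ∃ h0 r0, pvSplit t = h0 :: r0 := by
          cases hh : pvSplit t with
          | nil => exact absurd hh (pvSplit_ne_nil t)
          | cons a b => exact ⟨a, b, rfl⟩
        simp [pvSplit, hr, hc]

lemma splitOn_space (s : List Char) :
    PySem.Chars.splitOn s [' '] = pvSplit s := by
  simp only [PySem.Chars.splitOn]
  rw [splitOn_go_space (s.length + 1) s [] [] (by omega)]
  obtain ⟨h0, r0, hr⟩ : ∃ h0 r0, pvSplit s = h0 :: r0 := by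
    cases hh : pvSplit s with
    | nil => exact absurd hh (pvSplit_ne_nil s)
    | cons a b => exact ⟨a, b, rfl⟩
  simp [hr]

-- the four-replace chain is flatMap pvRep
lemma replace_chain (s : List Char) :
    PySem.Chars.replace (PySem.Chars.replace (PySem.Chars.replace (PySem.Chars.replace
      s ['('] [' ', '(', ' ']) [')'] [' ', ')', ' ']) ['['] [' ', '[', ' ']) [']'] [' ', ']', ' ']
    = s.flatMap pvRep := by
  simp only [replace_single, List.flatMap_assoc]
  induction s with
  | nil => simp
  | cons c t ih =>
    simp only [List.flatMap_cons, ih]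
    congr 1
    by_cases h1 : c = '(' ; · subst h1; decide
    by_cases h2 : c = ')' ; · subst h2; decide
    by_cases h3 : c = '[' ; · subst h3; decide
    by_cases h4 : c = ']' ; · subst h4; decide
    have hb : pvIsBracket c = false := by simp [pvIsBracket, h1, h2, h3, h4]
    simp [h1, h2, h3, h4, pvRep, hb]

-- prepend the pending run onto the first piece
def pvWithCur (cur : List Char) : List (List Char) → List (List Char)
  | [] => []
  | h :: r => (cur ++ h) :: r

-- A's per-command token list (non-empty pieces of the padded split), as strings
def pvTokens (s : List Char) : List String :=
  ((pvSplit (s.flatMap pvRep)).filter (fun t => t ≠ [])).map String.ofList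

lemma bracket_ne_space {c : Char} (h : pvIsBracket c = true) : c ≠ ' ' := by
  intro hc; subst hc; simp [pvIsBracket] at h

-- the central invariant of B's inner scan
lemma scan_invariant (s : List Char) :
    ∀ (toks : List String) (cur : List Char),
      (let p := s.foldl pvScanStep (toks, cur);
       if p.2 ≠ [] then p.1 ++ [String.ofList p.2] else p.1)
      = toks ++ ((pvWithCur cur (pvSplit (s.flatMap pvRep))).filter
          (fun t => t ≠ [])).map String.ofList := by
  induction s with
  | nil =>
    intro toks cur
    by_cases h : cur = [] <;> simp [pvSplit, pvWithCur, h]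
  | cons c t ih =>
    intro toks cur
    by_cases hb : pvIsBracket c = true
    · have hcs : c ≠ ' ' := bracket_ne_space hb
      have hrep : pvRep c = [' ', c, ' '] := by simp [pvRep, hb]
      obtain ⟨h0, r0, hr⟩ : ∃ h0 r0, pvSplit (t.flatMap pvRep) = h0 :: r0 := by
        cases hh : pvSplit (t.flatMap pvRep) with
        | nil => exact absurd hh (pvSplit_ne_nil _)
        | cons a b => exact ⟨a, b, rfl⟩
      have hstep : pvScanStep (toks, cur) c =
          ((if cur ≠ [] then toks ++ [String.ofList cur] else toks) ++ [String.ofList [c]], []) := by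
        simp [pvScanStep, hb]
      simp only [List.foldl_cons, hstep]
      rw [ih]
      simp only [List.flatMap_cons, hrep, List.cons_append, List.nil_append]
      have : pvSplit (' ' :: c :: ' ' :: t.flatMap pvRep) = [] :: [c] :: pvSplit (t.flatMap pvRep) := by
        simp [pvSplit, hcs]
      rw [this, hr]
      by_cases h : cur = [] <;> simp [pvWithCur, h]
    · by_cases hsp : c = ' '
      · subst hsp
        have hrep : pvRep ' ' = [' '] := by simp [pvRep, hb]
        have hstep : pvScanStep (toks, cur) ' ' =
            ((if cur ≠ [] then toks ++ [String.ofList cur] else toks), []) := by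
          simp [pvScanStep, hb]
        simp only [List.foldl_cons, hstep]
        rw [ih]
        simp only [List.flatMap_cons, hrep, List.cons_append, List.nil_append]
        have : pvSplit (' ' :: t.flatMap pvRep) = [] :: pvSplit (t.flatMap pvRep) := by
          simp [pvSplit]
        rw [this]
        obtain ⟨h0, r0, hr⟩ : ∃ h0 r0, pvSplit (t.flatMap pvRep) = h0 :: r0 := by
          cases hh : pvSplit (t.flatMap pvRep) with
          | nil => exact absurd hh (pvSplit_ne_nil _)
          | cons a b => exact ⟨a, b, rfl⟩
        by_cases h : cur = [] <;> simp [pvWithCur, h, hr]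
      · have hrep : pvRep c = [c] := by simp [pvRep, hb]
        have hstep : pvScanStep (toks, cur) c = (toks, cur ++ [c]) := by
          simp [pvScanStep, hb, hsp]
        simp only [List.foldl_cons, hstep]
        rw [ih]
        simp only [List.flatMap_cons, hrep, List.cons_append, List.nil_append]
        obtain ⟨h0, r0, hr⟩ : ∃ h0 r0, pvSplit (t.flatMap pvRep) = h0 :: r0 := by
          cases hh : pvSplit (t.flatMap pvRep) with
          | nil => exact absurd hh (pvSplit_ne_nil _)
          | cons a b => exact ⟨a, b, rfl⟩
        have : pvSplit (c :: t.flatMap pvRep) = (c :: h0) :: r0 := by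
          simp [pvSplit, hsp, hr]
        rw [this, hr]
        simp [pvWithCur]

-- B's per-command step appends pvTokens
lemma alt_step (toks : List String) (command : String) :
    (let p := command.toList.foldl pvScanStep (toks, []);
     if p.2 ≠ [] then p.1 ++ [String.ofList p.2] else p.1) = toks ++ pvTokens command.toList := by
  rw [scan_invariant]
  obtain ⟨h0, r0, hr⟩ : ∃ h0 r0, pvSplit (command.toList.flatMap pvRep) = h0 :: r0 := by
    cases hh : pvSplit (command.toList.flatMap pvRep) with
    | nil => exact absurd hh (pvSplit_ne_nil _)
    | cons a b => exact ⟨a, b, rfl⟩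
  simp [pvTokens, pvWithCur, hr]

-- A's per-command parts, filtered, are pvTokens
lemma a_parts (command : String) :
    ((PySem.Chars.splitOn (PySem.Str.replace (PySem.Str.replace (PySem.Str.replace
        (PySem.Str.replace command "(" " ( ") ")" " ) ") "[" " [ ") "]" " ] ").toList
        " ".toList).map String.ofList).filter (fun i => i ≠ "")
    = pvTokens command.toList := by
  have htl : (PySem.Str.replace (PySem.Str.replace (PySem.Str.replace
      (PySem.Str.replace command "(" " ( ") ")" " ) ") "[" " [ ") "]" " ] ").toList
      = command.toList.flatMap pvRep := by
    simp only [PySem.Str.replace, String.toList_ofList]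
    have e1 : "(".toList = ['('] := by simp
    have e2 : ")".toList = [')'] := by simp
    have e3 : "[".toList = ['['] := by simp
    have e4 : "]".toList = [']'] := by simp
    have f1 : " ( ".toList = [' ', '(', ' '] := by simp
    have f2 : " ) ".toList = [' ', ')', ' '] := by simp
    have f3 : " [ ".toList = [' ', '[', ' '] := by simp
    have f4 : " ] ".toList = [' ', ']', ' '] := by simp
    rw [e1, e2, e3, e4, f1, f2, f3, f4]
    exact replace_chain command.toList
  rw [htl]
  have hsep : (" ".toList : List Char) = [' '] := by simp
  rw [hsep, splitOn_space]
  rw [List.filter_map]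
  simp only [pvTokens]
  have : ∀ (l : List (List Char)),
      l.filter ((fun i => decide (i ≠ "")) ∘ String.ofList) = l.filter (fun t => decide (t ≠ [])) := by
    intro l; apply List.filter_congr; intro t _; simp [Function.comp]
  rw [this]


-- both sides flatten to the same flatMap
theorem filterByToken_spec_aux (lista : List String) :
    filterByToken lista = filterByToken_alt lista := by
  have hB : ∀ (toks : List String) (l : List String),
      l.foldl (fun tokens command =>
        let p := command.toList.foldl pvScanStep (tokens, [])
        if p.2 ≠ [] then p.1 ++ [String.ofList p.2] else p.1) toks
      = toks ++ l.flatMap (fun c => pvTokens c.toList) := by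
    intro toks l
    induction l generalizing toks with
    | nil => simp
    | cons c t ih => simp only [List.foldl_cons]; rw [alt_step toks c, ih]; simp
  have hA1 : ∀ (acc : List String) (l : List String),
      l.foldl (fun acc command =>
        let c1 := PySem.Str.replace command "(" " ( "
        let c2 := PySem.Str.replace c1 ")" " ) "
        let c3 := PySem.Str.replace c2 "[" " [ "
        let c4 := PySem.Str.replace c3 "]" " ] "
        let splitDelCommand : List String := (PySem.Chars.splitOn c4.toList " ".toList).map String.ofList
        splitDelCommand.foldl (fun a token => a ++ [token]) acc) acc
      = acc ++ l.flatMap (fun command =>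
          (PySem.Chars.splitOn (PySem.Str.replace (PySem.Str.replace (PySem.Str.replace
            (PySem.Str.replace command "(" " ( ") ")" " ) ") "[" " [ ") "]" " ] ").toList
            " ".toList).map String.ofList) := by
    intro acc l
    induction l generalizing acc with
    | nil => simp
    | cons c t ih =>
      simp only [List.foldl_cons]
      rw [PySem.List.foldl_append_singleton _ acc, ih]
      simp
  have hA2 : ∀ (acc : List String) (l : List String),
      l.foldl (fun acc i => if i ≠ "" then acc ++ [i] else acc) acc
      = acc ++ l.filter (fun i => i ≠ "") := by
    intro acc l
    induction l generalizing acc with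
    | nil => simp
    | cons c t ih =>
      simp only [List.foldl_cons]
      rw [ih]
      by_cases h : c = "" <;> simp [h]
  have hAdef : filterByToken lista
      = (lista.foldl (fun acc command =>
          let c1 := PySem.Str.replace command "(" " ( "
          let c2 := PySem.Str.replace c1 ")" " ) "
          let c3 := PySem.Str.replace c2 "[" " [ "
          let c4 := PySem.Str.replace c3 "]" " ] "
          let splitDelCommand : List String := (PySem.Chars.splitOn c4.toList " ".toList).map String.ofList
          splitDelCommand.foldl (fun a token => a ++ [token]) acc) []).foldl
            (fun acc i => if i ≠ "" then acc ++ [i] else acc) [] := rfl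
  have hBdef : filterByToken_alt lista
      = lista.foldl (fun tokens command =>
          let p := command.toList.foldl pvScanStep (tokens, [])
          if p.2 ≠ [] then p.1 ++ [String.ofList p.2] else p.1) [] := rfl
  rw [hAdef, hBdef, hA1, hA2, hB]
  simp only [List.nil_append]
  clear hAdef hBdef
  induction lista with
  | nil => simp
  | cons c t ih =>
    simp only [List.flatMap_cons, List.filter_append, ih, a_parts c]

-- ===== VERDICT (by name: the statement is the Claim_ definition above) =====
theorem filterByToken_spec : Claim_equal_filterByToken := by
  intro lista _
  exact filterByToken_spec_aux lista
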